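-- pv_equiv track=rewrite | github.com/braujian565/envctl | envctl/combiner.py | combine_sets
-- ===== SOURCE A (Python) =====
-- from typing import Dict, List, Literal, Optional
--
-- Strategy = Literal["union", "intersection"]
--
-- def combine_sets(
--     envs: List[Dict[str, str]],
--     strategy: Strategy = "union",
--     overwrite: bool = True,
-- ) -> Dict[str, str]:
--     """Combine a list of env dicts using *union* or *intersection* strategy.
--
--     union        – all keys present in any set; later sets win when *overwrite* is True.
--     intersection – only keys present in **every** set; later sets win when *overwrite* is True.
--     """
--     if not envs:
--         return {}
--
--     if strategy == "union":
--         result: Dict[str, str] = {}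
--         for env in envs:
--             if overwrite:
--                 result.update(env)
--             else:
--                 for k, v in env.items():
--                     result.setdefault(k, v)
--         return result
--
--     # intersection
--     common_keys = set(envs[0].keys())
--     for env in envs[1:]:
--         common_keys &= set(env.keys())
--
--     result = {}
--     for env in envs:
--         for k in common_keys:
--             if overwrite:
--                 result[k] = env[k]
--             else:
--                 result.setdefault(k, env[k])
--     return result
-- ===== SOURCE B (Python) =====
-- def combine_sets(envs, strategy="union", overwrite=True):
--     if not envs:
--         return {}
--
--     if strategy == "union":
--         # key order: first occurrence across all envs; value: decided per key
--         order = list(dict.fromkeys(k for env in envs for k in env))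
--         search = envs[::-1] if overwrite else envs
--         return {k: _first_value(search, k) for k in order}
--
--     # intersection
--     common_keys = set(envs[0].keys())
--     for env in envs[1:]:
--         common_keys &= set(env.keys())
--     winner = envs[-1] if overwrite else envs[0]
--     return {k: winner[k] for k in common_keys}
--
--
-- def _first_value(search, k):
--     for env in search:
--         if k in env:
--             return env[k]
-- ===== Notes on version B (the rewrite author's own statement) =====
-- stated objective: simpler
-- what changed: Instead of mutating an accumulator dict over nested loops, B computes the key order once (first-occurrence dedup for union, the common-key set for intersection) and builds the result in a single comprehension, selecting each value from the decisive env (last env wins when overwrite, first otherwise).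
import Mathlib
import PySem

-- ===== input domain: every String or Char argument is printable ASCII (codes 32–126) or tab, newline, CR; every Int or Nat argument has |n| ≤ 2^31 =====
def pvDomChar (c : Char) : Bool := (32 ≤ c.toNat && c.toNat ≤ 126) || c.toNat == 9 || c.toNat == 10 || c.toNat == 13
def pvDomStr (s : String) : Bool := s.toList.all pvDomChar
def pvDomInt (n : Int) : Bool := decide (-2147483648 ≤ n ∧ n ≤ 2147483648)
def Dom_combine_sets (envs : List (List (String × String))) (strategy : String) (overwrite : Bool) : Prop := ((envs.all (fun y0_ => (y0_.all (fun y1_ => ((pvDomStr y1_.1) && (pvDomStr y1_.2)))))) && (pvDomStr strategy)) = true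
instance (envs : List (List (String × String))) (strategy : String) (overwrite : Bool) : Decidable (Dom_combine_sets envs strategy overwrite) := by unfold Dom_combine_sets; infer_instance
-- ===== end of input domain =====

-- B replaces A's nested accumulator-dict mutation by computing the key order once and selecting
-- each value from the decisive env (last wins when overwrite, first otherwise): simpler decomposition.

-- ===== PORT A =====
def combine_sets (envs : List (List (String × String))) (strategy : String) (overwrite : Bool) : List (String × String) :=
  if envs = [] then []
  else if strategy = "union" then
    (envs.foldl (fun (result : PySem.Dict String String) env =>
        if overwrite then result.update env
        else env.foldl (fun r kv => r.setdefault kv.1 kv.2) result)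
      PySem.Dict.empty).items
  else
    -- intersection
    let common : PySem.Set String :=
      (envs.drop 1).foldl (fun s env => PySem.Set.inter s (PySem.Set.ofList (env.map (·.1))))
        (PySem.Set.ofList ((envs.headD []).map (·.1)))
    (envs.foldl (fun (result : PySem.Dict String String) env =>
        common.foldl (fun r k =>
          if overwrite then r.insert k ((PySem.Dict.ofList env).getD k "")
          else r.setdefault k ((PySem.Dict.ofList env).getD k ""))
        result)
      PySem.Dict.empty).items

-- ===== PORT B =====
-- Source B's _first_value: first env in `search` containing k; Python falls off the end (None) only
-- for k not occurring at all, which is unreachable from combine_sets_alt — "" stands in there.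
def firstValue (search : List (List (String × String))) (k : String) : String :=
  match search with
  | [] => ""
  | env :: rest =>
    if (PySem.Dict.ofList env).contains k then (PySem.Dict.ofList env).getD k ""
    else firstValue rest k

def combine_sets_alt (envs : List (List (String × String))) (strategy : String) (overwrite : Bool) : List (String × String) :=
  if envs = [] then []
  else if strategy = "union" then
    let order := PySem.List.dedup (envs.flatMap (fun env => env.map (·.1)))
    let search := if overwrite then envs.reverse else envs
    order.map (fun k => (k, firstValue search k))
  else
    let common : PySem.Set String :=
      (envs.drop 1).foldl (fun s env => PySem.Set.inter s (PySem.Set.ofList (env.map (·.1))))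
        (PySem.Set.ofList ((envs.headD []).map (·.1)))
    let winner := if overwrite then envs.getLastD [] else envs.headD []
    common.map (fun k => (k, (PySem.Dict.ofList winner).getD k ""))

-- ===== PRECONDITION & SPEC =====
-- Each env models a Python dict, so its keys are distinct; an association list with a duplicate
-- key inside one env does not represent any input the Python function can receive.
def Pre_combine_sets (envs : List (List (String × String))) (strategy : String) (overwrite : Bool) : Prop :=
  ∀ env ∈ envs, (env.map Prod.fst).Nodup
instance (envs : List (List (String × String))) (strategy : String) (overwrite : Bool) : Decidable (Pre_combine_sets envs strategy overwrite) := by unfold Pre_combine_sets; infer_instance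

def pvWitness_combine_sets : (List (List (String × String))) × String × Bool :=
  ([[("A", "1")], [("A", "2"), ("B", "3")]], "union", true)

def Spec_combine_sets (envs : List (List (String × String))) (strategy : String) (overwrite : Bool) (out : List (String × String)) : Prop := out = combine_sets_alt envs strategy overwrite
instance (envs : List (List (String × String))) (strategy : String) (overwrite : Bool) (out : List (String × String)) : Decidable (Spec_combine_sets envs strategy overwrite out) := by unfold Spec_combine_sets; infer_instance

-- ===== CLAIM (what is proved, stated in full; the proofs are below) =====
def Claim_equal_combine_sets : Prop := ∀ (envs : List (List (String × String))) (strategy : String) (overwrite : Bool), Dom_combine_sets envs strategy overwrite → Pre_combine_sets envs strategy overwrite → Spec_combine_sets envs strategy overwrite (combine_sets envs strategy overwrite)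

-- ===== LEMMAS AND PROOFS =====

-- value of the first env in `search` that contains k, as an Option
def pickOpt (search : List (List (String × String))) (k : String) : Option String :=
  match search with
  | [] => none
  | env :: rest => ((PySem.Dict.ofList env).get? k).or (pickOpt rest k)

theorem dict_ofList_eq_foldl (ps : List (String × String)) :
    PySem.Dict.ofList ps = ps.foldl (fun r kv => r.insert kv.1 kv.2) PySem.Dict.empty := rfl

theorem firstValue_eq_pickOpt (search : List (List (String × String))) (k : String) :
    firstValue search k = (pickOpt search k).getD "" := by
  induction search with
  | nil => rfl
  | cons env rest ih =>
    simp only [firstValue, pickOpt, PySem.Dict.contains_eq_isSome_get?]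
    cases h : (PySem.Dict.ofList env).get? k with
    | none => simpa [h] using ih
    | some v => simp [h, PySem.Dict.getD_eq_get?_getD]

-- get? through an insert-fold (dict.update) : last-occurrence-wins
theorem get?_foldl_insert (ps : List (String × String)) (d : PySem.Dict String String) (k : String) :
    (ps.foldl (fun r kv => r.insert kv.1 kv.2) d).get? k
      = ((PySem.Dict.ofList ps).get? k).or (d.get? k) := by
  induction ps generalizing d with
  | nil => simp [dict_ofList_eq_foldl]
  | cons p ps ih =>
    simp only [dict_ofList_eq_foldl, List.foldl_cons] at *
    rw [ih (d.insert p.1 p.2), ih (PySem.Dict.empty.insert p.1 p.2), Option.or_assoc]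
    congr 1
    rw [PySem.Dict.get?_insert, PySem.Dict.get?_insert]
    by_cases hk : k = p.1 <;> simp [hk]

theorem get?_setdefault_of_ne (d : PySem.Dict String String) (k k' : String) (v : String)
    (h : k' ≠ k) : (d.setdefault k v).get? k' = d.get? k' := by
  cases hc : d.contains k with
  | false => rw [PySem.Dict.setdefault_of_not_contains _ _ hc, PySem.Dict.get?_insert]; simp [h]
  | true => rw [PySem.Dict.setdefault_of_contains _ _ hc]

-- get? through a setdefault-fold : first-occurrence-wins
theorem get?_foldl_setdefault (ps : List (String × String)) (d : PySem.Dict String String) (k : String) :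
    (ps.foldl (fun r kv => r.setdefault kv.1 kv.2) d).get? k
      = (d.get? k).or ((ps.find? (fun kv => kv.1 == k)).map (·.2)) := by
  induction ps generalizing d with
  | nil => simp
  | cons p ps ih =>
    simp only [List.foldl_cons]
    rw [ih (d.setdefault p.1 p.2)]
    by_cases hk : p.1 = k
    · subst hk
      rw [List.find?_cons_of_pos (l := ps) (by simp), PySem.Dict.get?_setdefault_self]
      cases d.get? p.1 <;> simp
    · rw [List.find?_cons_of_neg (l := ps) (by simp [hk]),
        get?_setdefault_of_ne _ _ _ _ (fun h => hk h.symm)]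

theorem keys_ofList_eq (ps : List (String × String)) :
    (PySem.Dict.ofList ps).keys = PySem.Set.ofList (ps.map Prod.fst) := by
  rw [dict_ofList_eq_foldl,
    PySem.Dict.keys_foldl_insert_key (key := Prod.fst) (f := fun _ kv => kv.2)]
  simp [PySem.Set.update_nil_left]

theorem get?_ofList_of_nodup (ps : List (String × String)) (k : String)
    (h : (ps.map Prod.fst).Nodup) :
    (PySem.Dict.ofList ps).get? k = (ps.find? (fun kv => kv.1 == k)).map (·.2) := by
  induction ps with
  | nil => simp [dict_ofList_eq_foldl]
  | cons p ps ih =>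
    simp only [List.map_cons, List.nodup_cons] at h
    rw [dict_ofList_eq_foldl, List.foldl_cons, get?_foldl_insert]
    by_cases hk : p.1 = k
    · subst hk
      have hnone : (PySem.Dict.ofList ps).get? p.1 = none := by
        rw [PySem.Dict.get?_eq_none_iff_not_mem_keys, keys_ofList_eq]
        simpa [PySem.Set.mem_ofList] using h.1
      rw [hnone, List.find?_cons_of_pos (l := ps) (by simp), PySem.Dict.get?_insert]
      simp
    · have hk' : ¬ k = p.1 := fun hh => hk hh.symm
      rw [List.find?_cons_of_neg (l := ps) (by simp [hk]), PySem.Dict.get?_insert, ih h.2,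
        if_neg hk']
      simp

theorem keys_setdefault (d : PySem.Dict String String) (k : String) (v : String) :
    (d.setdefault k v).keys = PySem.Set.add d.keys k := by
  cases hc : d.contains k with
  | true =>
    rw [PySem.Dict.setdefault_of_contains _ _ hc,
      PySem.Set.add_of_mem ((PySem.Dict.contains_iff_mem_keys _ _).mp hc)]
  | false =>
    rw [PySem.Dict.setdefault_of_not_contains _ _ hc,
      PySem.Dict.keys_insert_of_not_contains _ _ hc,
      PySem.Set.add_of_not_mem (fun hm => by
        simp [(PySem.Dict.contains_iff_mem_keys _ _).mpr hm] at hc)]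

theorem keys_foldl_setdefault (ps : List (String × String)) (d : PySem.Dict String String) :
    (ps.foldl (fun r kv => r.setdefault kv.1 kv.2) d).keys
      = PySem.Set.update d.keys (ps.map Prod.fst) := by
  induction ps generalizing d with
  | nil => simp [PySem.Set.update]
  | cons p ps ih =>
    rw [List.foldl_cons, ih, List.map_cons, PySem.Set.update_cons, keys_setdefault]

-- pickOpt over an appended element
theorem pickOpt_append_singleton (l : List (List (String × String))) (e : List (String × String)) (k : String) :
    pickOpt (l ++ [e]) k = (pickOpt l k).or ((PySem.Dict.ofList e).get? k) := by
  induction l with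
  | nil => simp [pickOpt]
  | cons x l ih => simp [pickOpt, ih, Option.or_assoc]

-- ---------- union branch ----------

theorem union_get?_overwrite (envs : List (List (String × String))) (d : PySem.Dict String String) (k : String) :
    ((envs.foldl (fun r env => r.update env) d).get? k)
      = (pickOpt envs.reverse k).or (d.get? k) := by
  induction envs generalizing d with
  | nil => simp [pickOpt]
  | cons e es ih =>
    rw [List.foldl_cons, ih, List.reverse_cons, pickOpt_append_singleton, Option.or_assoc]
    congr 1
    exact get?_foldl_insert e d k

theorem union_get?_setdefault (envs : List (List (String × String))) (d : PySem.Dict String String) (k : String)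
    (h : ∀ env ∈ envs, (env.map Prod.fst).Nodup) :
    ((envs.foldl (fun r env => env.foldl (fun r kv => r.setdefault kv.1 kv.2) r) d).get? k)
      = (d.get? k).or (pickOpt envs k) := by
  induction envs generalizing d with
  | nil => simp [pickOpt]
  | cons e es ih =>
    rw [List.foldl_cons, ih _ (fun env hm => h env (List.mem_cons_of_mem _ hm)),
      get?_foldl_setdefault, ← get?_ofList_of_nodup e k (h e List.mem_cons_self),
      Option.or_assoc]
    rfl

theorem union_keys (overwrite : Bool) (envs : List (List (String × String))) (d : PySem.Dict String String) :
    ((envs.foldl (fun r env => if overwrite then r.update env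
        else env.foldl (fun r kv => r.setdefault kv.1 kv.2) r) d).keys)
      = PySem.Set.update d.keys (envs.flatMap (fun env => env.map (·.1))) := by
  induction envs generalizing d with
  | nil => simp [PySem.Set.update]
  | cons e es ih =>
    rw [List.foldl_cons, ih, List.flatMap_cons, PySem.Set.update_append]
    congr 1
    cases overwrite with
    | true =>
      simp only [if_true]
      exact PySem.Dict.keys_foldl_insert_key (key := Prod.fst) (f := fun _ kv => kv.2)
        (l := e) (d := d)
    | false =>
      simp only [Bool.false_eq_true, if_false]
      exact keys_foldl_setdefault e d

-- ---------- intersection branch ----------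

theorem inter_inner_get?_insert (cs : List String) (d : PySem.Dict String String) (k : String) (f : String → String) :
    ((cs.foldl (fun r c => r.insert c (f c)) d).get? k)
      = if k ∈ cs then some (f k) else d.get? k := by
  induction cs generalizing d with
  | nil => simp
  | cons c cs ih =>
    rw [List.foldl_cons, ih]
    by_cases h1 : k ∈ cs
    · simp [h1, List.mem_cons]
    · by_cases h2 : k = c
      · subst h2; simp [h1, List.mem_cons, PySem.Dict.get?_insert_self]
      · simp [h1, h2, List.mem_cons, PySem.Dict.get?_insert]

theorem inter_inner_get?_setdefault (cs : List String) (d : PySem.Dict String String) (k : String) (f : String → String) :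
    ((cs.foldl (fun r c => r.setdefault c (f c)) d).get? k)
      = (d.get? k).or (if k ∈ cs then some (f k) else none) := by
  induction cs generalizing d with
  | nil => simp
  | cons c cs ih =>
    rw [List.foldl_cons, ih]
    by_cases h2 : k = c
    · subst h2
      rw [PySem.Dict.get?_setdefault_self]
      cases d.get? k <;> simp
    · rw [get?_setdefault_of_ne _ _ _ _ h2]
      simp [h2]

theorem keys_foldl_setdefault_keys (cs : List String) (d : PySem.Dict String String) (f : String → String) :
    ((cs.foldl (fun r c => r.setdefault c (f c)) d).keys) = PySem.Set.update d.keys cs := by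
  induction cs generalizing d with
  | nil => simp [PySem.Set.update]
  | cons c cs ih => rw [List.foldl_cons, ih, PySem.Set.update_cons, keys_setdefault]

def istep (overwrite : Bool) (common : List String) (r : PySem.Dict String String)
    (env : List (String × String)) : PySem.Dict String String :=
  common.foldl (fun r k =>
    if overwrite then r.insert k ((PySem.Dict.ofList env).getD k "")
    else r.setdefault k ((PySem.Dict.ofList env).getD k "")) r

theorem istep_keys (overwrite : Bool) (common : List String) (d : PySem.Dict String String)
    (env : List (String × String)) :
    (istep overwrite common d env).keys = PySem.Set.update d.keys common := by
  cases overwrite with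
  | true =>
    unfold istep
    simp only [if_true]
    exact PySem.Dict.keys_foldl_insert common _ d
  | false =>
    unfold istep
    simp only [Bool.false_eq_true, if_false]
    exact keys_foldl_setdefault_keys common d _

theorem inter_get?_overwrite (common : List String)
    (es : List (List (String × String))) (e : List (String × String))
    (d : PySem.Dict String String) (k : String) (hk : k ∈ common) :
    (((e :: es).foldl (istep true common) d).get? k)
      = some ((PySem.Dict.ofList ((e :: es).getLastD [])).getD k "") := by
  induction es generalizing e d with
  | nil =>
    rw [List.foldl_cons, List.foldl_nil]
    unfold istep; simp only [if_true]
    rw [inter_inner_get?_insert]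
    simp [hk, List.getLastD]
  | cons e2 es ih =>
    rw [List.foldl_cons]
    rw [ih e2 (istep true common d e)]
    simp

theorem inter_get?_preserved (common : List String)
    (envs : List (List (String × String))) (d : PySem.Dict String String) (k : String) (v : String)
    (h : d.get? k = some v) :
    ((envs.foldl (istep false common) d).get? k) = some v := by
  induction envs generalizing d with
  | nil => exact h
  | cons e es ih =>
    rw [List.foldl_cons]
    apply ih
    unfold istep; simp only [Bool.false_eq_true, if_false]
    rw [inter_inner_get?_setdefault, h]
    rfl

theorem set_update_self (s : PySem.Set String) (h : s.Nodup) :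
    PySem.Set.update s s = s := by
  rw [PySem.Set.update_eq_append_filter, PySem.Set.ofList_eq_self_of_nodup _ h]
  have : s.filter (fun y => !(PySem.Set.contains s y)) = [] := by
    rw [List.filter_eq_nil_iff]
    intro y hy
    simp [pysem, hy]
  rw [this, List.append_nil]

theorem inter_keys_const (es : List (List (String × String))) (C : PySem.Set String) (h : C.Nodup) :
    es.foldl (fun ks (_ : List (String × String)) => PySem.Set.update ks C) C = C := by
  induction es with
  | nil => rfl
  | cons e es ih => rw [List.foldl_cons, set_update_self C h]; exact ih

theorem inter_keys (overwrite : Bool) (common : List String)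
    (envs : List (List (String × String))) (d : PySem.Dict String String) :
    ((envs.foldl (istep overwrite common) d).keys)
      = envs.foldl (fun ks _ => PySem.Set.update ks common) d.keys := by
  induction envs generalizing d with
  | nil => rfl
  | cons e es ih => rw [List.foldl_cons, ih, istep_keys, List.foldl_cons]

theorem common_nodup (envs : List (List (String × String))) (init : PySem.Set String) (h : init.Nodup) :
    (envs.foldl (fun s env => PySem.Set.inter s (PySem.Set.ofList (env.map (·.1)))) init).Nodup := by
  induction envs generalizing init with
  | nil => exact h
  | cons e es ih => exact ih _ (PySem.Set.nodup_inter _ _ h)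

theorem nodup_keys_union (overwrite : Bool) (envs : List (List (String × String))) :
    ((envs.foldl (fun r env => if overwrite then r.update env
        else env.foldl (fun r kv => r.setdefault kv.1 kv.2) r) PySem.Dict.empty).keys).Nodup := by
  rw [union_keys]
  simp only [PySem.Dict.keys_empty, PySem.Set.update_nil_left]
  exact PySem.Set.nodup_ofList _

-- ===== VERDICT (by name: the statement is the Claim_ definition above) =====
theorem combine_sets_spec : Claim_equal_combine_sets := by
  intro envs strategy overwrite _hdom hpre
  unfold Spec_combine_sets combine_sets combine_sets_alt
  by_cases he : envs = []
  · simp [he]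
  · rw [if_neg he, if_neg he]
    by_cases hs : strategy = "union"
    · rw [if_pos hs, if_pos hs]
      dsimp only
      -- union branch
      rw [PySem.Dict.items_eq_map_keys _ (nodup_keys_union overwrite envs) "",
        union_keys]
      simp only [PySem.Dict.keys_empty, PySem.Set.update_nil_left, PySem.List.dedup_eq_ofList]
      apply List.map_congr_left
      intro k _
      rw [PySem.Dict.getD_eq_get?_getD, firstValue_eq_pickOpt]
      congr 1
      cases overwrite with
      | true =>
        simp only [if_true]
        rw [union_get?_overwrite]
        simp
      | false =>
        simp only [Bool.false_eq_true, if_false]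
        rw [union_get?_setdefault envs PySem.Dict.empty k hpre]
        simp
    · rw [if_neg hs, if_neg hs]
      dsimp only
      -- intersection branch
      obtain ⟨e, es, rfl⟩ := List.exists_cons_of_ne_nil he
      set C := ((e :: es).drop 1).foldl
          (fun s env => PySem.Set.inter s (PySem.Set.ofList (env.map (·.1))))
          (PySem.Set.ofList (((e :: es).headD []).map (·.1))) with hC
      have hCnodup : C.Nodup := common_nodup _ _ (PySem.Set.nodup_ofList _)
      have hstep : (fun (result : PySem.Dict String String) env =>
          C.foldl (fun r k =>
            if overwrite then r.insert k ((PySem.Dict.ofList env).getD k "")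
            else r.setdefault k ((PySem.Dict.ofList env).getD k "")) result)
          = istep overwrite C := rfl
      rw [hstep]
      have hkeys : (((e :: es).foldl (istep overwrite C) PySem.Dict.empty).keys) = C := by
        rw [inter_keys, PySem.Dict.keys_empty, List.foldl_cons, PySem.Set.update_nil_left,
          PySem.Set.ofList_eq_self_of_nodup _ hCnodup]
        exact inter_keys_const es C hCnodup
      rw [PySem.Dict.items_eq_map_keys _ (by rw [hkeys]; exact hCnodup) "", hkeys]
      apply List.map_congr_left
      intro k hk
      congr 1
      rw [PySem.Dict.getD_eq_get?_getD]
      cases overwrite with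
      | true =>
        rw [inter_get?_overwrite C es e PySem.Dict.empty k hk]
        simp
      | false =>
        have h1 : ((istep false C PySem.Dict.empty e).get? k)
            = some ((PySem.Dict.ofList e).getD k "") := by
          unfold istep; simp only [Bool.false_eq_true, if_false]
          rw [inter_inner_get?_setdefault]
          simp [hk]
        rw [List.foldl_cons, inter_get?_preserved C es _ k _ h1]
        simp [List.headD]
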